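-- pv_equiv track=rewrite | github.com/AHVG/INE5205 | AT3/main.py | calculate_freq
-- ===== SOURCE A (Python) =====
-- def calculate_freq(data, intervals):
--     freqs = [0 for _ in intervals]
--     for d in data:
--         for i, interval in enumerate(intervals):
--             if interval[0] <= d < interval[1]:
--                 freqs[i] += 1
--                 break
--     return freqs[:]
-- ===== SOURCE B (Python) =====
-- def calculate_freq(data, intervals):
--     # Precompute the first-matching interval for each elementary segment of the
--     # boundary grid, tally duplicate data values once, then binary-search each
--     # distinct value into its segment and add its multiplicity.
--     bounds = sorted({b for iv in intervals for b in (iv[0], iv[1])})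
--     owners = []
--     for b in bounds[:-1]:
--         owner = None
--         for i, iv in enumerate(intervals):
--             if iv[0] <= b < iv[1]:
--                 owner = i
--                 break
--         owners.append(owner)
--     counts = {}
--     for d in data:
--         counts[d] = counts.get(d, 0) + 1
--     freqs = [0] * len(intervals)
--     for d, c in counts.items():
--         lo, hi = 0, len(bounds)
--         while lo < hi:
--             mid = (lo + hi) // 2
--             if bounds[mid] <= d:
--                 lo = mid + 1
--             else:
--                 hi = mid
--         j = lo - 1
--         if 0 <= j < len(owners):
--             o = owners[j]
--             if o is not None:
--                 freqs[o] += c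
--     return freqs
-- ===== Notes on version B (the rewrite author's own statement) =====
-- stated objective: faster
-- what changed: B sorts the distinct interval endpoints once, precomputes the first-matching interval for each elementary segment of that boundary grid, tallies duplicate data values in one dict pass, and binary-searches each distinct value into its segment, instead of scanning all intervals for every data point.
import Mathlib
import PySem

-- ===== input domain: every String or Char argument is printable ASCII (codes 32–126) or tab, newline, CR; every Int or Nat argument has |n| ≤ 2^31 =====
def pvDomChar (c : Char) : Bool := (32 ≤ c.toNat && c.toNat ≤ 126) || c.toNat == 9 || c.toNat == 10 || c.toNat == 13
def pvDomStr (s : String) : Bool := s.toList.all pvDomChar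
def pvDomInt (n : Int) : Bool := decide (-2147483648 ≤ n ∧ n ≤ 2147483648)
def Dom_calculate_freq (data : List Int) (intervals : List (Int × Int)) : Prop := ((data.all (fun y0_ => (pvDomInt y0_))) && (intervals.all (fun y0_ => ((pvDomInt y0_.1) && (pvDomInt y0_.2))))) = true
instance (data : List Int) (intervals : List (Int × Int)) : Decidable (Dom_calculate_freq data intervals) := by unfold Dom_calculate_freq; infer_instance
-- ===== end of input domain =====

-- B replaces A's per-point scan of all intervals by a precomputed owner per elementary
-- boundary segment plus a binary search per point (objective: faster, asymptotic).

-- ===== PORT A =====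
-- inner 'for i, interval in enumerate(intervals): if …: freqs[i] += 1; break'
-- (freqs[i] is always in range since i < len(intervals) = len(freqs), so getD is exact)
def pvAInner (d : Int) (freqs : List Int) : List (Int × (Int × Int)) → List Int
  | [] => freqs
  | (i, iv) :: rest =>
      if iv.1 ≤ d ∧ d < iv.2 then freqs.set i.toNat (freqs.getD i.toNat 0 + 1)
      else pvAInner d freqs rest

def calculate_freq (data : List Int) (intervals : List (Int × Int)) : List Int :=
  data.foldl (fun freqs d => pvAInner d freqs (PySem.List.enumerate intervals 0))
    (intervals.map (fun _ => 0))

-- ===== PORT B =====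
-- 'owner = None; for i, iv in enumerate(intervals): if …: owner = i; break'
def pvBOwner (b : Int) : List (Int × (Int × Int)) → Option Int
  | [] => none
  | (i, iv) :: rest => if iv.1 ≤ b ∧ b < iv.2 then some i else pvBOwner b rest

-- the hand-written 'while lo < hi' bisect loop (bounds[mid] always in range, getD exact)
def pvBisect (bounds : List Int) (d : Int) (lo hi : Nat) : Nat :=
  if lo < hi then
    let mid := (lo + hi) / 2
    if bounds.getD mid 0 ≤ d then pvBisect bounds d (mid + 1) hi
    else pvBisect bounds d lo mid
  else lo
termination_by hi - lo
decreasing_by all_goals omega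

def calculate_freq_alt (data : List Int) (intervals : List (Int × Int)) : List Int :=
  let bounds := PySem.List.sorted
    (PySem.Set.ofList (intervals.flatMap (fun iv => [iv.1, iv.2]))) (fun x => x) false
  let owners := (PySem.List.slice bounds none (some (-1))).map
    (fun b => pvBOwner b (PySem.List.enumerate intervals 0))
  let counts := data.foldl (fun cd d => cd.insert d (cd.getD d 0 + 1))
    (PySem.Dict.empty : PySem.Dict Int Int)
  counts.items.foldl (fun freqs p =>
      let j : Int := (pvBisect bounds p.1 0 bounds.length : Int) - 1
      if 0 ≤ j ∧ j < (owners.length : Int) then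
        match owners.getD j.toNat none with
        | some o => freqs.set o.toNat (freqs.getD o.toNat 0 + p.2)
        | none => freqs
      else freqs)
    (List.replicate intervals.length 0)

-- ===== PRECONDITION & SPEC =====
def Spec_calculate_freq (data : List Int) (intervals : List (Int × Int)) (out : List Int) : Prop := out = calculate_freq_alt data intervals
instance (data : List Int) (intervals : List (Int × Int)) (out : List Int) : Decidable (Spec_calculate_freq data intervals out) := by unfold Spec_calculate_freq; infer_instance

-- ===== CLAIM (what is proved, stated in full; the proofs are below) =====
def Claim_equal_calculate_freq : Prop := ∀ (data : List Int) (intervals : List (Int × Int)), Dom_calculate_freq data intervals → Spec_calculate_freq data intervals (calculate_freq data intervals)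

-- ===== LEMMAS AND PROOFS =====

-- A's inner loop factors through the first-match index
theorem pvAInner_eq (d : Int) (freqs : List Int) (l : List (Int × (Int × Int))) :
    pvAInner d freqs l = (match pvBOwner d l with
      | some i => freqs.set i.toNat (freqs.getD i.toNat 0 + 1)
      | none => freqs) := by
  induction l with
  | nil => rfl
  | cons p rest ih =>
      obtain ⟨i, iv⟩ := p
      by_cases h : iv.1 ≤ d ∧ d < iv.2 <;> simp [pvAInner, pvBOwner, h, ih]

-- first-match scan only depends on the truth of the condition on each element
theorem pvBOwner_congr (b d : Int) (l : List (Int × (Int × Int)))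
    (h : ∀ p ∈ l, (p.2.1 ≤ b ∧ b < p.2.2) ↔ (p.2.1 ≤ d ∧ d < p.2.2)) :
    pvBOwner b l = pvBOwner d l := by
  induction l with
  | nil => rfl
  | cons p rest ih =>
      obtain ⟨i, iv⟩ := p
      have hp := h (i, iv) (by simp)
      by_cases hb : iv.1 ≤ b ∧ b < iv.2
      · simp [pvBOwner, hb, hp.mp hb]
      · have hd : ¬ (iv.1 ≤ d ∧ d < iv.2) := fun hd => hb (hp.mpr hd)
        simp [pvBOwner, hb, hd]
        exact ih (fun q hq => h q (by simp [hq]))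

theorem pvBOwner_none (d : Int) (l : List (Int × (Int × Int)))
    (h : ∀ p ∈ l, ¬ (p.2.1 ≤ d ∧ d < p.2.2)) :
    pvBOwner d l = none := by
  induction l with
  | nil => rfl
  | cons p rest ih =>
      obtain ⟨i, iv⟩ := p
      simp [pvBOwner, h (i, iv) (by simp)]
      exact ih (fun q hq => h q (by simp [hq]))

-- bisect_right correctness on a monotone list
theorem pvBisect_spec (bounds : List Int) (d : Int) (lo hi : Nat)
    (hmono : ∀ (p q : Nat) (hp : p < bounds.length) (hq : q < bounds.length), p ≤ q →
      bounds[p] ≤ bounds[q])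
    (hhi : hi ≤ bounds.length) (hlohi : lo ≤ hi)
    (hlow : ∀ (k : Nat) (h : k < bounds.length), k < lo → bounds[k] ≤ d)
    (hhigh : ∀ (k : Nat) (h : k < bounds.length), hi ≤ k → d < bounds[k]) :
    lo ≤ pvBisect bounds d lo hi ∧ pvBisect bounds d lo hi ≤ hi ∧
    (∀ (k : Nat) (h : k < bounds.length), k < pvBisect bounds d lo hi → bounds[k] ≤ d) ∧
    (∀ (k : Nat) (h : k < bounds.length), pvBisect bounds d lo hi ≤ k → d < bounds[k]) := by
  induction lo, hi using pvBisect.induct bounds d with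
  | case1 lo hi hlt mid hle ih =>
      rw [pvBisect, if_pos hlt, if_pos hle]
      have hm : mid = (lo + hi) / 2 := rfl
      rw [← hm]
      have hmidlt : mid < bounds.length := by simp only [mid] at *; omega
      have hget : bounds.getD mid 0 = bounds[mid] := List.getD_eq_getElem bounds 0 hmidlt
      rw [hget] at hle
      have h := ih hhi (by simp only [mid] at *; omega)
        (fun k hk hklt => by
          by_cases hkm : k < lo
          · exact hlow k hk hkm
          · exact le_trans (hmono k mid hk hmidlt (by omega)) hle)
        hhigh
      exact ⟨by simp only [hm] at h ⊢; omega, h.2⟩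
  | case2 lo hi hlt mid hgt ih =>
      rw [pvBisect, if_pos hlt, if_neg hgt]
      have hm : mid = (lo + hi) / 2 := rfl
      rw [← hm]
      have hmidlt : mid < bounds.length := by simp only [mid] at *; omega
      have hget : bounds.getD mid 0 = bounds[mid] := List.getD_eq_getElem bounds 0 hmidlt
      rw [hget] at hgt
      push Not at hgt
      have h := ih (by omega) (by simp only [mid] at *; omega) hlow
        (fun k hk hmk => lt_of_lt_of_le hgt (hmono mid k hmidlt hk hmk))
      refine ⟨h.1, by simp only [hm] at h ⊢; omega, h.2.2⟩
  | case3 lo hi hge =>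
      rw [pvBisect, if_neg hge]
      exact ⟨le_refl _, hlohi, fun k hk hklt => hlow k hk hklt,
        fun k hk hge2 => hhigh k hk (by omega)⟩

-- B's per-point segment lookup selects exactly the first matching interval
theorem pvSel_eq (intervals : List (Int × Int)) (d : Int)
    (bounds : List Int) (owners : List (Option Int))
    (hb : bounds = PySem.List.sorted
      (PySem.Set.ofList (intervals.flatMap (fun iv => [iv.1, iv.2]))) (fun x => x) false)
    (ho : owners = (PySem.List.slice bounds none (some (-1))).map
      (fun b => pvBOwner b (PySem.List.enumerate intervals 0))) :
    (if 0 ≤ ((pvBisect bounds d 0 bounds.length : Int) - 1) ∧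
        ((pvBisect bounds d 0 bounds.length : Int) - 1) < (owners.length : Int)
     then owners.getD ((pvBisect bounds d 0 bounds.length : Int) - 1).toNat none
     else none)
    = pvBOwner d (PySem.List.enumerate intervals 0) := by
  have hpair : bounds.Pairwise (· < ·) := by
    rw [hb]; exact PySem.List.sorted_ofList_pairwise_lt _
  have hsmono : ∀ (p q : Nat) (hp : p < bounds.length) (hq : q < bounds.length), p < q →
      bounds[p] < bounds[q] := by
    intro p q hp hq hpq
    exact List.pairwise_iff_getElem.mp hpair p q hp hq hpq
  have hmono : ∀ (p q : Nat) (hp : p < bounds.length) (hq : q < bounds.length), p ≤ q →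
      bounds[p] ≤ bounds[q] := by
    intro p q hp hq hpq
    rcases Nat.lt_or_ge p q with h | h
    · exact le_of_lt (hsmono p q hp hq h)
    · have : p = q := by omega
      subst this; exact le_refl _
  have hmem : ∀ iv ∈ intervals, iv.1 ∈ bounds ∧ iv.2 ∈ bounds := by
    intro iv hiv
    rw [hb]
    constructor <;>
    · rw [PySem.List.mem_sorted, PySem.Set.mem_ofList, List.mem_flatMap]
      exact ⟨iv, hiv, by simp⟩
  have hidx : ∀ x ∈ bounds, ∃ (k : Nat) (h : k < bounds.length), bounds[k] = x := by
    intro x hx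
    obtain ⟨k, hk, he⟩ := List.mem_iff_getElem.mp hx
    exact ⟨k, hk, he⟩
  have hlen : owners.length = bounds.length - 1 := by
    rw [ho, List.length_map, PySem.List.slice_to_neg_one, List.length_dropLast]
  have hspec := pvBisect_spec bounds d 0 bounds.length hmono (le_refl _) (Nat.zero_le _)
    (fun k hk hk0 => absurd hk0 (Nat.not_lt_zero k))
    (fun k hk hge => absurd hk (by omega))
  set r := pvBisect bounds d 0 bounds.length with hr
  obtain ⟨-, hrle, hlow, hhigh⟩ := hspec
  by_cases hr0 : r = 0
  · rw [if_neg (by simp [hr0])]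
    symm
    apply pvBOwner_none
    intro p hp hc
    rw [PySem.List.mem_enumerate_iff] at hp
    obtain ⟨k, hk, rfl⟩ := hp
    obtain ⟨j, hj, hje⟩ := hidx _ (hmem intervals[k] (by simp) ).1
    have := hhigh j hj (by omega)
    simp at hc
    omega
  · by_cases hrn : r = bounds.length
    · have hn1 : 1 ≤ bounds.length := by omega
      rw [if_neg (by rw [hlen]; omega)]
      symm
      apply pvBOwner_none
      intro p hp hc
      rw [PySem.List.mem_enumerate_iff] at hp
      obtain ⟨k, hk, rfl⟩ := hp
      obtain ⟨j, hj, hje⟩ := hidx _ (hmem intervals[k] (by simp)).2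
      have := hlow j hj (by omega)
      simp at hc
      omega
    · -- 1 ≤ r ≤ n - 1
      have hrlt : r < bounds.length := by omega
      have hr1 : r - 1 < bounds.length - 1 := by omega
      rw [if_pos (by constructor <;> [omega; (rw [hlen]; omega)])]
      have htn : ((pvBisect bounds d 0 bounds.length : Int) - 1).toNat = r - 1 := by
        rw [← hr]; omega
      rw [htn]
      have hgd : owners.getD (r - 1) none
          = pvBOwner (bounds[r-1]'(by omega)) (PySem.List.enumerate intervals 0) := by
        rw [ho, PySem.List.slice_to_neg_one]
        rw [List.getD_eq_getElem _ _ (by simp [List.length_dropLast]; omega)]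
        rw [List.getElem_map, List.getElem_dropLast]
      rw [hgd]
      apply pvBOwner_congr
      intro p hp
      rw [PySem.List.mem_enumerate_iff] at hp
      obtain ⟨k, hk, rfl⟩ := hp
      have hbd : bounds[r-1]'(by omega) ≤ d := hlow (r-1) (by omega) (by omega)
      simp only
      constructor
      · rintro ⟨h1, h2⟩
        refine ⟨le_trans h1 hbd, ?_⟩
        obtain ⟨j, hj, hje⟩ := hidx _ (hmem intervals[k] (by simp)).2
        rcases Nat.lt_or_ge j r with hjr | hjr
        · have := hmono j (r-1) hj (by omega) (by omega)
          omega
        · have := hhigh j hj (by omega)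
          omega
      · rintro ⟨h1, h2⟩
        refine ⟨?_, lt_of_le_of_lt hbd h2⟩
        obtain ⟨j, hj, hje⟩ := hidx _ (hmem intervals[k] (by simp)).1
        rcases Nat.lt_or_ge j r with hjr | hjr
        · have := hmono j (r-1) hj (by omega) (by omega)
          omega
        · have := hhigh j hj (by omega)
          omega

-- slot increment by c (freqs[o] += c); out-of-range set is a no-op, matching in-range Python use
def pvBump (i : Nat) (c : Int) (f : List Int) : List Int := f.set i (f.getD i 0 + c)

def pvApply (o : Option Int) (c : Int) (f : List Int) : List Int :=
  match o with
  | some i => pvBump i.toNat c f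
  | none => f

def pvSel (intervals : List (Int × Int)) (d : Int) : Option Int :=
  pvBOwner d (PySem.List.enumerate intervals 0)

-- pushing the in-range test inside/outside the owner match
theorem pvIfMatch (c : Prop) [Decidable c] (x : Option Int) (m : Int) (freqs : List Int) :
    (match (if c then x else none) with
     | some o => freqs.set o.toNat (freqs.getD o.toNat 0 + m)
     | none => freqs)
    = if c then
        (match x with
         | some o => freqs.set o.toNat (freqs.getD o.toNat 0 + m)
         | none => freqs)
      else freqs := by
  split_ifs <;> rfl

theorem pvMatch_eq_apply (x : Option Int) (m : Int) (freqs : List Int) :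
    (match x with
     | some o => freqs.set o.toNat (freqs.getD o.toNat 0 + m)
     | none => freqs) = pvApply x m freqs := by
  cases x <;> rfl

theorem pvBump_oob (k : Nat) (c : Int) (g : List Int) (h : ¬ k < g.length) :
    pvBump k c g = g := List.set_eq_of_length_le (by omega)

theorem pvBump_length (i : Nat) (c : Int) (f : List Int) : (pvBump i c f).length = f.length := by
  simp [pvBump]

theorem pvBump_comm (i j : Nat) (c1 c2 : Int) (f : List Int) :
    pvBump i c1 (pvBump j c2 f) = pvBump j c2 (pvBump i c1 f) := by
  by_cases hi : i < f.length
  · by_cases hj : j < f.length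
    · by_cases hij : i = j
      · subst hij
        unfold pvBump
        have hv : ∀ v : Int, (f.set i v).getD i 0 = v := fun v => by
          rw [List.getD_eq_getElem _ _ (by simpa using hi), List.getElem_set_self]
        rw [hv, hv, List.set_set, List.set_set]
        congr 1
        ring
      · unfold pvBump
        have hvij : ∀ v : Int, (f.set j v).getD i 0 = f.getD i 0 := fun v => by
          rw [List.getD_eq_getElem _ _ (by simpa using hi), List.getElem_set_ne (by omega),
            List.getD_eq_getElem _ _ hi]
        have hvji : ∀ v : Int, (f.set i v).getD j 0 = f.getD j 0 := fun v => by
          rw [List.getD_eq_getElem _ _ (by simpa using hj), List.getElem_set_ne (by omega),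
            List.getD_eq_getElem _ _ hj]
        rw [hvij, hvji, List.set_comm _ _ (by omega)]
    · rw [pvBump_oob j c2 f hj, pvBump_oob j c2 _ (by rw [pvBump_length]; exact hj)]
  · by_cases hj : j < f.length
    · rw [pvBump_oob i c1 _ (by rw [pvBump_length]; exact hi), pvBump_oob i c1 f hi]
    · rw [pvBump_oob j c2 f hj, pvBump_oob i c1 f hi, pvBump_oob j c2 f hj]

theorem pvApply_comm (o o' : Option Int) (c c' : Int) (f : List Int) :
    pvApply o c (pvApply o' c' f) = pvApply o' c' (pvApply o c f) := by
  cases o <;> cases o' <;> simp [pvApply, pvBump_comm]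

theorem pvApply_succ (o : Option Int) (c : Int) (f : List Int) :
    pvApply o (c + 1) f = pvApply o 1 (pvApply o c f) := by
  cases o with
  | none => rfl
  | some i =>
      simp only [pvApply]
      by_cases hi : i.toNat < f.length
      · unfold pvBump
        have hv : ∀ v : Int, (f.set i.toNat v).getD i.toNat 0 = v := fun v => by
          rw [List.getD_eq_getElem _ _ (by simpa using hi), List.getElem_set_self]
        rw [hv, List.set_set]
        congr 1
        ring
      · rw [pvBump_oob _ _ f hi, pvBump_oob _ _ f hi, pvBump_oob _ _ f hi]

-- an operation commuting with every step moves out of a foldl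
theorem pvFoldl_comm {α : Type} (F : List Int → α → List Int) (g : List Int → List Int)
    (l : List α) (f : List Int) (h : ∀ (x : List Int) (p : α), F (g x) p = g (F x p)) :
    l.foldl F (g f) = g (l.foldl F f) := by
  induction l generalizing f with
  | nil => rfl
  | cons p rest ih => simp only [List.foldl_cons, h]; exact ih _

-- per-point increments of first-match slots can be grouped by distinct value
theorem pvGroup (sel : Int → Option Int) (data : List Int) (init : List Int) :
    data.foldl (fun f d => pvApply (sel d) 1 f) init
      = ((PySem.Set.ofList data).map (fun k => (k, (data.count k : Int)))).foldl
          (fun f p => pvApply (sel p.1) p.2 f) init := by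
  induction data using List.reverseRecOn with
  | nil => rfl
  | append_singleton xs d ih =>
      rw [List.foldl_append, List.foldl_cons, List.foldl_nil, ih]
      by_cases hd : d ∈ xs
      · have hofl : PySem.Set.ofList (xs ++ [d]) = PySem.Set.ofList xs := by
          rw [PySem.Set.ofList_eq_foldl, List.foldl_append, List.foldl_cons, List.foldl_nil,
            ← PySem.Set.ofList_eq_foldl]
          simp [PySem.Set.add, PySem.Set.contains, PySem.Set.mem_ofList, hd]
        rw [hofl]
        obtain ⟨s, t, hst⟩ := List.append_of_mem ((PySem.Set.mem_ofList xs d).mpr hd)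
        have hnd : (s ++ d :: t).Nodup := by rw [← hst]; exact PySem.Set.nodup_ofList xs
        have hds : d ∉ s := by
          intro h; exact (List.disjoint_of_nodup_append hnd) h (by simp)
        have hdt : d ∉ t := by
          have := hnd.of_append_right; simp at this; exact this.1
        rw [hst]
        have hmap : ∀ (u : List Int), d ∉ u →
            u.map (fun k => (k, ((xs ++ [d]).count k : Int)))
              = u.map (fun k => (k, (xs.count k : Int))) := by
          intro u hu
          apply List.map_congr_left
          intro k hk
          have : k ≠ d := fun h => hu (h ▸ hk)
          simp [List.count_append, Ne.symm this]
        simp only [List.map_append, List.map_cons, List.foldl_append, List.foldl_cons,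
          hmap s hds, hmap t hdt]
        have hcnt : ((xs ++ [d]).count d : Int) = (xs.count d : Int) + 1 := by
          simp [List.count_append]
        rw [hcnt, pvApply_succ]
        exact (pvFoldl_comm (fun f p => pvApply (sel p.1) p.2 f) (pvApply (sel d) 1)
          ((t.map (fun k => (k, (xs.count k : Int))))) _
          (fun x p => pvApply_comm (sel p.1) (sel d) p.2 1 x)).symm
      · have hofl : PySem.Set.ofList (xs ++ [d]) = PySem.Set.ofList xs ++ [d] := by
          rw [PySem.Set.ofList_eq_foldl, List.foldl_append, List.foldl_cons, List.foldl_nil,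
            ← PySem.Set.ofList_eq_foldl]
          simp [PySem.Set.add, PySem.Set.contains, PySem.Set.mem_ofList, hd]
        rw [hofl]
        have hmap : (PySem.Set.ofList xs).map (fun k => (k, ((xs ++ [d]).count k : Int)))
            = (PySem.Set.ofList xs).map (fun k => (k, (xs.count k : Int))) := by
          apply List.map_congr_left
          intro k hk
          have : k ≠ d := fun h => hd (h ▸ (PySem.Set.mem_ofList xs k).mp hk)
          simp [List.count_append, Ne.symm this]
        have hcnt : ((xs ++ [d]).count d : Int) = 1 := by
          simp [List.count_append, List.count_eq_zero_of_not_mem hd]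
        simp only [List.map_append, List.map_cons, List.map_nil, List.foldl_append,
          List.foldl_cons, List.foldl_nil, hmap, hcnt]

-- ===== VERDICT (by name: the statement is the Claim_ definition above) =====
theorem calculate_freq_spec : Claim_equal_calculate_freq := by
  intro data intervals _
  unfold Spec_calculate_freq calculate_freq calculate_freq_alt
  dsimp only []
  have hinit : intervals.map (fun _ => (0 : Int)) = List.replicate intervals.length 0 := by
    simp [List.map_const']
  rw [hinit, PySem.Dict.foldl_insert_getD_add_one_eq_counter, PySem.Dict.items_counter]
  have hstepA : (fun (freqs : List Int) (d : Int) =>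
      pvAInner d freqs (PySem.List.enumerate intervals 0))
      = fun freqs d => pvApply (pvSel intervals d) 1 freqs := by
    funext freqs d
    rw [pvAInner_eq, pvMatch_eq_apply]
    rfl
  rw [hstepA, pvGroup (pvSel intervals)]
  congr 1
  funext freqs p
  rw [← pvIfMatch, pvSel_eq intervals p.1 _ _ rfl rfl, pvMatch_eq_apply]
  rfl
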